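-- pv_equiv track=rewrite | github.com/raeez/chiral-bar-cobar | compute/lib/derived_langlands_engine.py | oper_jet_dim_sln
-- ===== SOURCE A (Python) =====
-- def oper_jet_dim_sln(N: int, weight: int) -> int:
--     """Dimension of the weight-n jet space of sl_N-opers.
--
--     An sl_N-oper is L = d^N + q_2(z) d^{N-2} + ... + q_N(z).
--     The field q_j has conformal weight j (j = 2, ..., N).
--
--     The jet space at weight n counts monomials in the Taylor coefficients
--     of q_2, ..., q_N. The Taylor coefficient (q_j)_m has weight j + m.
--
--     dim Op_n = coefficient of t^n in prod_{j=2}^{N} prod_{m>=0} 1/(1-t^{j+m})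
--              = coefficient of t^n in prod_{j=2}^{N} prod_{s>=j} 1/(1-t^s)
--              = coefficient of t^n in prod_{s>=2} 1/(1-t^s)^{min(s-1, N-1)}
--
--     For sl_2: each factor appears once, recovering p_2(n).
--     For sl_3: generators at weight 2 (from q_2) and weight 3 (from q_2 and q_3),
--     with multiplicity growing.
--     """
--     if weight < 0:
--         return 0
--     if weight == 0:
--         return 1
--
--     # Build generating function coefficients via iterated convolution
--     coeffs = [0] * (weight + 1)
--     coeffs[0] = 1
--
--     # For each conformal weight s >= 2, multiply by 1/(1 - t^s)^{mult(s)}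
--     # where mult(s) = min(s - 1, N - 1) counts how many q_j contribute
--     # a Taylor coefficient of weight s.
--     for s in range(2, weight + 1):
--         mult = min(s - 1, N - 1)
--         # Multiply by 1/(1 - t^s)^mult using binomial series
--         for _ in range(mult):
--             for n in range(s, weight + 1):
--                 coeffs[n] += coeffs[n - s]
--
--     return coeffs[weight]
-- ===== SOURCE B (Python) =====
-- def oper_jet_dim_sln(N: int, weight: int) -> int:
--     if weight < 0:
--         return 0
--     W = weight
--     f = [1] + [0] * W
--     for s in range(2, W + 1):
--         m = min(s - 1, N - 1)
--         if m <= 0: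
--             continue
--         sc = []
--         b = 1
--         for i in range(1, min(m, W // s) + 1):
--             b = b * (m - i + 1) // i
--             sc.append(-b if i & 1 == 0 else b)
--         for n in range(s, W + 1):
--             acc = f[n]
--             j = n
--             for c in sc:
--                 j -= s
--                 if j < 0:
--                     break
--                 acc += c * f[j]
--             f[n] = acc
--     return f[W]
-- ===== Notes on version B (the rewrite author's own statement) =====
-- stated objective: alternative
-- what changed: Per conformal weight s, A multiplies by 1/(1-t^s)^mult with mult separate in-place convolution passes; B instead divides by the polynomial (1-t^s)^mult in a single in-place pass, using its finite signed binomial expansion as a short recurrence window (coefficients built with exact integer division).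
import Mathlib
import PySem

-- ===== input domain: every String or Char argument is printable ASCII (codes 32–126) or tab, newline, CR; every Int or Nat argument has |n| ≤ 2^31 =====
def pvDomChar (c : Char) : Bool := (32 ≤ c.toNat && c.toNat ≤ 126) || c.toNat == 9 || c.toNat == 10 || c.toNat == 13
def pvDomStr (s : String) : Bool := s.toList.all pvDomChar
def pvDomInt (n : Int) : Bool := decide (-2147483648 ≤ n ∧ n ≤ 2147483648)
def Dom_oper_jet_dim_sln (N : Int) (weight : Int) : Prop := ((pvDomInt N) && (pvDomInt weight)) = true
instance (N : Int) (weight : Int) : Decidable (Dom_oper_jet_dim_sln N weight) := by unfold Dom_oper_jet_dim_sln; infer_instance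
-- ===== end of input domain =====

-- B multiplies by 1/(1-t^s)^mult in ONE in-place pass (dividing by the polynomial
-- (1-t^s)^mult via its finite signed binomial expansion) instead of A's mult separate
-- convolution passes per conformal weight s (objective: alternative).

-- ===== PORT A =====
-- one step of A's inner loop `coeffs[n] += coeffs[n - s]` (all indices are in range,
-- so List.set / List.getD are exact for the Python list accesses)
def pvPassStep (s : Nat) (c : List Int) (n : Nat) : List Int :=
  c.set n (c.getD n 0 + c.getD (n - s) 0)

-- A's `for n in range(s, weight + 1): coeffs[n] += coeffs[n - s]`
def pvPass (s W : Nat) (c : List Int) : List Int :=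
  (List.range' s (W + 1 - s)).foldl (pvPassStep s) c

-- A's loop body for one s: `for _ in range(mult)` runs mult times (0 if mult ≤ 0)
def pvStepA (N : Int) (W : Nat) (c : List Int) (s : Nat) : List Int :=
  let mult : Int := min ((s : Int) - 1) (N - 1)
  (pvPass s W)^[mult.toNat] c

def oper_jet_dim_sln (N : Int) (weight : Int) : Int :=
  if weight < 0 then 0
  else if weight = 0 then 1
  else
    let W := weight.toNat
    let c0 := (List.replicate (W + 1) (0 : Int)).set 0 1
    let c := (List.range' 2 (W - 1)).foldl (pvStepA N W) c0
    c.getD W 0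

-- ===== PORT B =====
-- B's signed-coefficient table sc: sc[i-1] = (-1)^(i+1) * C(m, i) for i = 1 .. min(m, W//s),
-- built incrementally with Python's `//` (exact here)
def pvSc (m : Int) (t : Nat) : List Int :=
  ((List.range' 1 t).foldl
    (fun (wp : List Int × Int) (i : Nat) =>
      let b := PySem.Int.floordiv (wp.2 * (m - (i : Int) + 1)) ((i : Nat) : Int)
      (wp.1 ++ [if i % 2 = 0 then -b else b], b)) ([], 1)).1

-- B's inner window loop `for c in sc: j -= s; if j < 0: break; acc += c * f[j]`
-- (j stays the Python int; f[j] is read with j ≥ 0 only, so getD is exact)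
def pvWin (s : Nat) (f : List Int) : List Int → Int → Int → Int
  | [], _, acc => acc
  | c :: rest, j, acc =>
    let j' := j - (s : Int)
    if j' < 0 then acc
    else pvWin s f rest j' (acc + c * f.getD j'.toNat 0)

-- B's body of `for n in range(s, W + 1)`: acc = f[n]; window; f[n] = acc
def pvElimStep (s : Nat) (sc : List Int) (c : List Int) (n : Nat) : List Int :=
  c.set n (pvWin s c sc (n : Int) (c.getD n 0))

def pvElim (s W : Nat) (sc : List Int) (c : List Int) : List Int :=
  (List.range' s (W + 1 - s)).foldl (pvElimStep s sc) c

-- B's loop body for one s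
def pvStepB (N : Int) (W : Nat) (f : List Int) (s : Nat) : List Int :=
  let m : Int := min ((s : Int) - 1) (N - 1)
  if m ≤ 0 then f
  else pvElim s W (pvSc m (min m ((W / s : Nat) : Int)).toNat) f

def oper_jet_dim_sln_alt (N : Int) (weight : Int) : Int :=
  if weight < 0 then 0
  else
    let W := weight.toNat
    let f0 : List Int := 1 :: List.replicate W 0
    let f := (List.range' 2 (W - 1)).foldl (pvStepB N W) f0
    f.getD W 0

-- ===== PRECONDITION & SPEC =====
def Spec_oper_jet_dim_sln (N : Int) (weight : Int) (out : Int) : Prop := out = oper_jet_dim_sln_alt N weight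
instance (N : Int) (weight : Int) (out : Int) : Decidable (Spec_oper_jet_dim_sln N weight out) := by unfold Spec_oper_jet_dim_sln; infer_instance

-- ===== CLAIM (what is proved, stated in full; the proofs are below) =====
def Claim_equal_oper_jet_dim_sln : Prop := ∀ (N : Int) (weight : Int), Dom_oper_jet_dim_sln N weight → Spec_oper_jet_dim_sln N weight (oper_jet_dim_sln N weight)

-- ===== LEMMAS AND PROOFS =====

-- reference semantics of one of A's passes: (Pf s f) n = f n + (Pf s f) (n - s) for s ≤ n
def Pf (s : Nat) (f : Nat → Int) : Nat → Int
  | n => if _h : n < s ∨ s = 0 then f n else f n + Pf s f (n - s)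
termination_by n => n
decreasing_by omega

-- the difference operator along stride s (inverse of one pass)
def Df (s : Nat) (h : Nat → Int) (n : Nat) : Int :=
  if n < s ∨ s = 0 then h n else h n - h (n - s)

lemma Pf_lt {s : Nat} (f : Nat → Int) {n : Nat} (h : n < s) : Pf s f n = f n := by
  rw [Pf]; simp [Or.inl h]

lemma Pf_ge {s : Nat} (f : Nat → Int) {n : Nat} (hs : s ≠ 0) (h : s ≤ n) :
    Pf s f n = f n + Pf s f (n - s) := by
  rw [Pf]; rw [dif_neg (by omega)]

lemma Pf_zero_step (f : Nat → Int) (n : Nat) : Pf 0 f n = f n := by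
  rw [Pf]; simp

lemma Pf_congr_le {s : Nat} {f g : Nat → Int} {n : Nat}
    (h : ∀ i, i ≤ n → f i = g i) : Pf s f n = Pf s g n := by
  induction n using Nat.strong_induction_on with
  | _ n ih =>
    by_cases hc : n < s ∨ s = 0
    · rcases hc with hc | hc
      · rw [Pf_lt f hc, Pf_lt g hc]; exact h n le_rfl
      · subst hc; rw [Pf_zero_step, Pf_zero_step]; exact h n le_rfl
    · rw [not_or] at hc
      rw [Nat.not_lt] at hc
      rw [Pf_ge f hc.2 hc.1, Pf_ge g hc.2 hc.1, h n le_rfl,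
        ih (n - s) (by omega) (fun i hi => h i (by omega))]

lemma Df_Pf {s : Nat} (hs : s ≠ 0) (h : Nat → Int) : Df s (Pf s h) = h := by
  funext n
  unfold Df
  by_cases hc : n < s ∨ s = 0
  · rw [if_pos hc]
    exact Pf_lt h (by omega)
  · rw [if_neg hc, not_or, Nat.not_lt] at *
    rw [Pf_ge h hs (by omega)]
    ring

lemma DfIter_PfIter {s : Nat} (hs : s ≠ 0) (M : Nat) (f : Nat → Int) :
    (Df s)^[M] ((Pf s)^[M] f) = f := by
  induction M with
  | zero => simp
  | succ M ih =>
    rw [Function.iterate_succ_apply' (Pf s), Function.iterate_succ_apply (Df s),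
        Df_Pf hs, ih]

-- the iterated difference is the signed binomial window (coefficients beyond M vanish)
lemma truncbin {s : Nat} (hs : s ≠ 0) (M : Nat) (h : Nat → Int) (n : Nat) :
    (Df s)^[M] h n
      = ∑ i ∈ Finset.range (n / s + 1),
          ((-1 : Int) ^ i * ((Nat.choose M i : Nat) : Int)) * h (n - i * s) := by
  induction M generalizing h with
  | zero =>
    rw [Function.iterate_zero_apply]
    rw [Finset.sum_eq_single_of_mem 0 (Finset.mem_range.mpr (Nat.succ_pos _))
      (fun i _ hi => by
        rw [Nat.choose_eq_zero_of_lt (by omega : (0 : Nat) < i)]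
        simp)]
    simp
  | succ M ih =>
    rw [Function.iterate_succ_apply, ih (Df s h)]
    set K := n / s with hK
    -- expand Df inside: full difference for i < K, plain h at i = K
    rw [Finset.sum_range_succ]
    have hlast : Df s h (n - K * s) = h (n - K * s) := by
      unfold Df
      rw [if_pos (Or.inl (by
        have hmod : n - K * s = n % s := by
          rw [hK, Nat.mod_def, Nat.mul_comm]
        rw [hmod]
        exact Nat.mod_lt n (by omega)))]
    rw [hlast]
    have hexp : ∀ i ∈ Finset.range K,
        ((-1 : Int) ^ i * ((Nat.choose M i : Nat) : Int)) * Df s h (n - i * s)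
        = ((-1 : Int) ^ i * ((Nat.choose M i : Nat) : Int)) * h (n - i * s)
          - ((-1 : Int) ^ i * ((Nat.choose M i : Nat) : Int)) * h (n - (i + 1) * s) := by
      intro i hi
      rw [Finset.mem_range] at hi
      have hle : (i + 1) * s ≤ n := (Nat.le_div_iff_mul_le (by omega)).mp (by omega)
      have hge : s ≤ n - i * s := by
        have : i * s + s ≤ n := by
          calc i * s + s = (i + 1) * s := by ring
            _ ≤ n := hle
        omega
      have hidx : n - i * s - s = n - (i + 1) * s := by
        rw [show (i + 1) * s = i * s + s from by ring, Nat.sub_sub]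
      unfold Df
      rw [if_neg (by omega), hidx]
      ring
    rw [Finset.sum_congr rfl hexp, Finset.sum_sub_distrib]
    -- rearrange target: split its i = 0 term and use Pascal on the rest
    conv_rhs => rw [Finset.sum_range_succ']
    have hpas : ∀ i ∈ Finset.range K,
        ((-1 : Int) ^ (i + 1) * ((Nat.choose (M + 1) (i + 1) : Nat) : Int)) * h (n - (i + 1) * s)
        = -(((-1 : Int) ^ i * ((Nat.choose M i : Nat) : Int)) * h (n - (i + 1) * s))
          + ((-1 : Int) ^ (i + 1) * ((Nat.choose M (i + 1) : Nat) : Int)) * h (n - (i + 1) * s) := by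
      intro i _
      rw [Nat.choose_succ_succ]
      push_cast
      ring
    rw [Finset.sum_congr rfl hpas, Finset.sum_add_distrib]
    have hsplit := Finset.sum_range_succ
      (fun i => ((-1 : Int) ^ i * ((Nat.choose M i : Nat) : Int)) * h (n - i * s)) K
    have hKsum := Finset.sum_range_succ'
      (fun i => ((-1 : Int) ^ i * ((Nat.choose M i : Nat) : Int)) * h (n - i * s)) K
    have hneg : ∑ i ∈ Finset.range K,
        -(((-1 : Int) ^ i * ((Nat.choose M i : Nat) : Int)) * h (n - (i + 1) * s))
        = -∑ i ∈ Finset.range K,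
            ((-1 : Int) ^ i * ((Nat.choose M i : Nat) : Int)) * h (n - (i + 1) * s) := by
      rw [← Finset.sum_neg_distrib]
    simp only [pow_zero, Nat.choose_zero_right, Nat.cast_one, one_mul, Nat.zero_mul,
      Nat.sub_zero] at hKsum hsplit ⊢
    linarith [hsplit, hKsum, hneg]

-- the M-pass result satisfies the signed-binomial window recurrence B uses
lemma g_rec {s : Nat} (hs : s ≠ 0) (M : Nat) (f : Nat → Int) (n : Nat) :
    (Pf s)^[M] f n
      = f n + ∑ i ∈ Finset.range (n / s),
          ((-1 : Int) ^ i * ((Nat.choose M (i + 1) : Nat) : Int))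
            * (Pf s)^[M] f (n - (i + 1) * s) := by
  have h1 := truncbin hs M ((Pf s)^[M] f) n
  rw [DfIter_PfIter hs M f] at h1
  rw [Finset.sum_range_succ'] at h1
  simp only [pow_zero, Nat.choose_zero_right, Nat.cast_one, one_mul, Nat.zero_mul,
    Nat.sub_zero] at h1
  have h2 : ∑ i ∈ Finset.range (n / s),
      ((-1 : Int) ^ (i + 1) * ((Nat.choose M (i + 1) : Nat) : Int))
        * (Pf s)^[M] f (n - (i + 1) * s)
      = -∑ i ∈ Finset.range (n / s),
          ((-1 : Int) ^ i * ((Nat.choose M (i + 1) : Nat) : Int))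
            * (Pf s)^[M] f (n - (i + 1) * s) := by
    rw [← Finset.sum_neg_distrib]
    refine Finset.sum_congr rfl (fun i _ => ?_)
    ring
  rw [h2] at h1
  linarith

lemma getD_set_eq (l : List Int) (i : Nat) (a : Int) (h : i < l.length) :
    (l.set i a).getD i 0 = a := by
  simp [List.getD_eq_getElem?_getD, h]

lemma getD_set_ne (l : List Int) (i n : Nat) (a : Int) (h : n ≠ i) :
    (l.set i a).getD n 0 = l.getD n 0 := by
  simp [List.getD_eq_getElem?_getD, (Ne.symm h)]

-- invariant of A's inner loop: entries below s + t hold Pf, the rest are untouched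
lemma pvPass_fold {s W : Nat} (hs : s ≠ 0) (c : List Int) (hlen : c.length = W + 1) :
    ∀ t, s + t ≤ W + 1 →
      ((List.range' s t).foldl (pvPassStep s) c).length = W + 1 ∧
      ∀ n, ((List.range' s t).foldl (pvPassStep s) c).getD n 0
        = if n < s + t then Pf s (fun i => c.getD i 0) n else c.getD n 0 := by
  intro t
  induction t with
  | zero =>
    intro _
    refine ⟨hlen, fun n => ?_⟩
    simp only [List.range'_zero, List.foldl_nil]
    by_cases hn : n < s + 0
    · rw [if_pos hn, Pf_lt _ (by omega)]
    · rw [if_neg hn]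
  | succ t ih =>
    intro hst
    obtain ⟨h1, h2⟩ := ih (by omega)
    rw [List.range'_1_concat, List.foldl_append, List.foldl_cons, List.foldl_nil]
    set r := (List.range' s t).foldl (pvPassStep s) c with hr
    have hv1 : r.getD (s + t) 0 = c.getD (s + t) 0 := by
      rw [h2 (s + t), if_neg (by omega)]
    have hv2 : r.getD (s + t - s) 0 = Pf s (fun i => c.getD i 0) t := by
      have : s + t - s = t := by omega
      rw [this, h2 t, if_pos (by omega)]
    constructor
    · simp [pvPassStep, h1]
    · intro n
      unfold pvPassStep
      by_cases hn : n = s + t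
      · subst hn
        rw [getD_set_eq _ _ _ (by rw [h1]; omega), hv1, hv2,
            if_pos (show s + t < s + (t + 1) by omega)]
        conv_rhs => rw [Pf_ge _ hs (show s ≤ s + t by omega)]
        rw [show s + t - s = t from by omega]
      · rw [getD_set_ne _ _ _ _ hn, h2 n]
        by_cases hn2 : n < s + t
        · rw [if_pos hn2, if_pos (by omega)]
        · rw [if_neg hn2, if_neg (by omega)]

-- one pass of A realizes Pf on all entries
lemma pvPass_spec {s W : Nat} (hs : s ≠ 0) (hsW : s ≤ W) (c : List Int)
    (hlen : c.length = W + 1) :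
    (pvPass s W c).length = W + 1 ∧
    ∀ n, n ≤ W → (pvPass s W c).getD n 0 = Pf s (fun i => c.getD i 0) n := by
  obtain ⟨h1, h2⟩ := pvPass_fold hs c hlen (W + 1 - s) (by omega)
  refine ⟨h1, fun n hn => ?_⟩
  rw [show pvPass s W c = (List.range' s (W + 1 - s)).foldl (pvPassStep s) c from rfl,
      h2 n, if_pos (by omega)]

-- k passes on the list realize the k-fold Pf iterate
lemma pvPass_iter {s W : Nat} (hs : s ≠ 0) (hsW : s ≤ W) (k : Nat) (c : List Int)
    (hlen : c.length = W + 1) :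
    ((pvPass s W)^[k] c).length = W + 1 ∧
    ∀ n, n ≤ W → ((pvPass s W)^[k] c).getD n 0 = (Pf s)^[k] (fun i => c.getD i 0) n := by
  induction k with
  | zero => exact ⟨hlen, fun n _ => rfl⟩
  | succ k ih =>
    obtain ⟨h1, h2⟩ := ih
    rw [Function.iterate_succ_apply' (pvPass s W), Function.iterate_succ_apply' (Pf s)]
    obtain ⟨g1, g2⟩ := pvPass_spec hs hsW _ h1
    refine ⟨g1, fun n hn => ?_⟩
    rw [g2 n hn]
    exact Pf_congr_le (fun i hi => h2 i (le_trans hi hn))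

-- the sign helper B's table realizes
def pvSgnC (M i : Nat) : Int :=
  if i % 2 = 0 then -((Nat.choose M i : Nat) : Int) else ((Nat.choose M i : Nat) : Int)

lemma pvSgnC_eq (M i : Nat) :
    pvSgnC M (i + 1) = (-1 : Int) ^ i * ((Nat.choose M (i + 1) : Nat) : Int) := by
  unfold pvSgnC
  rcases Nat.even_or_odd i with h | h
  · have h2 : (i + 1) % 2 ≠ 0 := by rw [Nat.even_iff] at h; omega
    rw [if_neg h2, Even.neg_one_pow h, one_mul]
  · have h2 : (i + 1) % 2 = 0 := by rw [Nat.odd_iff] at h; omega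
    rw [if_pos h2, Odd.neg_one_pow h, neg_one_mul]

-- B's signed-coefficient table after the whole fold
lemma pvSc_fold {m : Int} (hm : 1 ≤ m) (t : Nat) (ht : (t : Int) ≤ m) :
    (List.range' 1 t).foldl
      (fun (wp : List Int × Int) (i : Nat) =>
        let b := PySem.Int.floordiv (wp.2 * (m - (i : Int) + 1)) ((i : Nat) : Int)
        (wp.1 ++ [if i % 2 = 0 then -b else b], b)) ([], 1)
    = ((List.range t).map (fun i => pvSgnC m.toNat (i + 1)),
       ((Nat.choose m.toNat t : Nat) : Int)) := by
  induction t with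
  | zero => simp
  | succ t ih =>
    have hM : ((m.toNat : Int)) = m := Int.toNat_of_nonneg (by omega)
    rw [List.range'_1_concat, List.foldl_append, List.foldl_cons, List.foldl_nil,
        ih (by push_cast at ht ⊢; omega)]
    have harg : m - ((1 + t : Nat) : Int) + 1 = ((m.toNat - t : Nat) : Int) := by
      push_cast at ht ⊢
      omega
    have hnat : (Nat.choose m.toNat t * (m.toNat - t)) / (1 + t)
        = Nat.choose m.toNat (t + 1) := by
      rw [← Nat.choose_succ_right_eq, show t + 1 = 1 + t from by omega,
          Nat.mul_div_cancel _ (by omega)]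
    have hdiv : PySem.Int.floordiv
        (((Nat.choose m.toNat t : Nat) : Int) * (m - ((1 + t : Nat) : Int) + 1))
        ((1 + t : Nat) : Int)
        = ((Nat.choose m.toNat (t + 1) : Nat) : Int) := by
      rw [harg, ← Int.natCast_mul, PySem.Int.floordiv_natCast, hnat]
    show ((List.range t).map (fun i => pvSgnC m.toNat (i + 1))
            ++ [if (1 + t) % 2 = 0
                then -(PySem.Int.floordiv
                        (((Nat.choose m.toNat t : Nat) : Int) * (m - ((1 + t : Nat) : Int) + 1))
                        ((1 + t : Nat) : Int))
                else PySem.Int.floordiv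
                        (((Nat.choose m.toNat t : Nat) : Int) * (m - ((1 + t : Nat) : Int) + 1))
                        ((1 + t : Nat) : Int)],
          PySem.Int.floordiv
            (((Nat.choose m.toNat t : Nat) : Int) * (m - ((1 + t : Nat) : Int) + 1))
            ((1 + t : Nat) : Int)) = _
    rw [hdiv, Nat.add_comm 1 t]
    conv_rhs => rw [List.range_succ, List.map_append]
    rfl

lemma pvSc_length {m : Int} (hm : 1 ≤ m) (t : Nat) (ht : (t : Int) ≤ m) :
    (pvSc m t).length = t := by
  unfold pvSc
  rw [pvSc_fold hm t ht]
  simp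

lemma pvSc_getD {m : Int} (hm : 1 ≤ m) (t : Nat) (ht : (t : Int) ≤ m)
    {i : Nat} (hi : i < t) :
    (pvSc m t).getD i 0 = pvSgnC m.toNat (i + 1) := by
  unfold pvSc
  rw [pvSc_fold hm t ht]
  exact PySem.List.getD_map_range _ t i 0 hi

-- B's window loop computes the truncated dot product with sc
lemma pvWin_spec {s : Nat} (hs : s ≠ 0) (r : List Int) (sc : List Int) :
    ∀ (n : Nat) (acc : Int),
    pvWin s r sc (n : Int) acc
      = acc + ∑ i ∈ Finset.range (min sc.length (n / s)),
          sc.getD i 0 * r.getD (n - (i + 1) * s) 0 := by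
  induction sc with
  | nil => intro n acc; simp [pvWin]
  | cons c rest ih =>
    intro n acc
    simp only [pvWin]
    by_cases hns : n < s
    · rw [if_pos (by omega), Nat.div_eq_of_lt hns]
      simp
    · rw [Nat.not_lt] at hns
      rw [if_neg (by omega)]
      have hcast : (n : Int) - (s : Int) = ((n - s : Nat) : Int) := by omega
      rw [hcast, Int.toNat_natCast, ih (n - s)]
      rw [Nat.div_eq_sub_div (by omega) hns, List.length_cons, Nat.succ_min_succ,
          Finset.sum_range_succ']
      have hterm : ∀ i, (c :: rest).getD (i + 1) 0 * r.getD (n - (i + 1 + 1) * s) 0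
          = rest.getD i 0 * r.getD (n - s - (i + 1) * s) 0 := by
        intro i
        rw [List.getD_cons_succ,
            show (i + 1 + 1) * s = s + (i + 1) * s from by ring, Nat.sub_sub]
      simp only [hterm, List.getD_cons_zero]
      rw [show n - (0 + 1) * s = n - s from by omega]
      ring

-- invariant of B's inner loop: entries below s + t hold the M-fold pass iterate
lemma pvElim_fold {s W : Nat} (hs : s ≠ 0) {m : Int} (hm : 1 ≤ m) (c : List Int)
    (hlen : c.length = W + 1) :
    ∀ t, s + t ≤ W + 1 →
      ((List.range' s t).foldl (pvElimStep s (pvSc m (min m ((W / s : Nat) : Int)).toNat)) c).length = W + 1 ∧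
      ∀ n, n ≤ W →
        ((List.range' s t).foldl (pvElimStep s (pvSc m (min m ((W / s : Nat) : Int)).toNat)) c).getD n 0
        = if n < s + t then (Pf s)^[m.toNat] (fun i => c.getD i 0) n else c.getD n 0 := by
  have hM : ((m.toNat : Int)) = m := Int.toNat_of_nonneg (by omega)
  have ht0le : (((min m ((W / s : Nat) : Int)).toNat : Nat) : Int) ≤ m := by
    rcases le_total m ((W / s : Nat) : Int) with hc | hc
    · rw [min_eq_left hc]; omega
    · rw [min_eq_right hc]; omega
  have ht0Ws : (min m ((W / s : Nat) : Int)).toNat ≤ W / s := by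
    rcases le_total m ((W / s : Nat) : Int) with hc | hc
    · rw [min_eq_left hc]; omega
    · rw [min_eq_right hc, Int.toNat_natCast]
  set t0 : Nat := (min m ((W / s : Nat) : Int)).toNat with ht0
  set sc : List Int := pvSc m t0 with hsc
  set g : Nat → Int := (Pf s)^[m.toNat] (fun i => c.getD i 0) with hg
  intro t
  induction t with
  | zero =>
    intro _
    refine ⟨hlen, fun n _ => ?_⟩
    simp only [List.range'_zero, List.foldl_nil]
    by_cases hn : n < s + 0
    · rw [if_pos hn]
      have : ∀ k, (Pf s)^[k] (fun i => c.getD i 0) n = c.getD n 0 := by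
        intro k
        induction k with
        | zero => rfl
        | succ k ihk =>
          rw [Function.iterate_succ_apply' (Pf s), Pf_lt _ (by omega : n < s), ihk]
      exact (this m.toNat).symm
    · rw [if_neg hn]
  | succ t ih =>
    intro hst
    obtain ⟨h1, h2⟩ := ih (by omega)
    rw [List.range'_1_concat, List.foldl_append, List.foldl_cons, List.foldl_nil]
    set r := (List.range' s t).foldl (pvElimStep s sc) c with hr
    have hn0 : s + t ≤ W := by omega
    have hv1 : r.getD (s + t) 0 = c.getD (s + t) 0 := by
      rw [h2 (s + t) hn0, if_neg (by omega)]
    constructor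
    · simp [pvElimStep, h1]
    · intro n hnW
      unfold pvElimStep
      by_cases hn : n = s + t
      · subst hn
        rw [getD_set_eq _ _ _ (by rw [h1]; omega), hv1]
        rw [if_pos (show s + t < s + (t + 1) by omega)]
        rw [pvWin_spec hs r sc (s + t) _]
        have hlen_sc : sc.length = t0 := pvSc_length hm t0 ht0le
        have hKle : (s + t) / s ≤ W / s := Nat.div_le_div_right hn0
        -- each window read sees an already-updated entry = g
        have hread : ∀ i ∈ Finset.range (min sc.length ((s + t) / s)),
            sc.getD i 0 * r.getD (s + t - (i + 1) * s) 0
            = pvSgnC m.toNat (i + 1) * g (s + t - (i + 1) * s) := by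
          intro i hi
          rw [Finset.mem_range, hlen_sc] at hi
          have hi1s : 1 * s ≤ (i + 1) * s := Nat.mul_le_mul_right s (by omega)
          have hidxlt : s + t - (i + 1) * s < s + t := by omega
          rw [pvSc_getD hm t0 ht0le (by omega),
              h2 (s + t - (i + 1) * s) (by omega), if_pos hidxlt]
        rw [Finset.sum_congr rfl hread]
        -- extend the sum to range ((s+t)/s): added coefficients C(M, i+1) vanish
        have hext : ∑ i ∈ Finset.range (min sc.length ((s + t) / s)),
            pvSgnC m.toNat (i + 1) * g (s + t - (i + 1) * s)
            = ∑ i ∈ Finset.range ((s + t) / s),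
                pvSgnC m.toNat (i + 1) * g (s + t - (i + 1) * s) := by
          refine Finset.sum_subset (fun x hx => ?_) (fun i hiK hinot => ?_)
          · rw [Finset.mem_range] at hx ⊢
            omega
          rw [Finset.mem_range] at hiK
          rw [Finset.mem_range, not_lt, hlen_sc] at hinot
          have hiM : m.toNat ≤ i := by omega
          unfold pvSgnC
          rw [Nat.choose_eq_zero_of_lt (by omega : m.toNat < i + 1)]
          simp
        rw [hext]
        have := g_rec hs m.toNat (fun i => c.getD i 0) (s + t)
        simp only [pvSgnC_eq]
        rw [← hg] at this
        rw [this]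
      · rw [getD_set_ne _ _ _ _ hn, h2 n hnW]
        by_cases hn2 : n < s + t
        · rw [if_pos hn2, if_pos (by omega)]
        · rw [if_neg hn2, if_neg (by omega)]

-- the two per-factor loop bodies agree on lists of length W+1 (and preserve it)
lemma step_eq {s W : Nat} (h2 : 2 ≤ s) (hsW : s ≤ W) (N : Int) (c : List Int)
    (hlen : c.length = W + 1) :
    pvStepA N W c s = pvStepB N W c s ∧ (pvStepA N W c s).length = W + 1 := by
  unfold pvStepA pvStepB
  show (pvPass s W)^[(min ((s : Int) - 1) (N - 1)).toNat] c
        = (if min ((s : Int) - 1) (N - 1) ≤ 0 then c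
           else pvElim s W
             (pvSc (min ((s : Int) - 1) (N - 1))
               (min (min ((s : Int) - 1) (N - 1)) ((W / s : Nat) : Int)).toNat) c)
      ∧ ((pvPass s W)^[(min ((s : Int) - 1) (N - 1)).toNat] c).length = W + 1
  set mult : Int := min ((s : Int) - 1) (N - 1) with hmult
  by_cases hm : mult ≤ 0
  · rw [if_pos hm]
    rw [show mult.toNat = 0 from by omega, Function.iterate_zero_apply]
    exact ⟨rfl, hlen⟩
  · rw [if_neg hm]
    rw [not_le] at hm
    have hm1 : 1 ≤ mult := by omega
    have hs0 : s ≠ 0 := by omega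
    obtain ⟨a1, a2⟩ := pvPass_iter hs0 hsW mult.toNat c hlen
    obtain ⟨b1, b2⟩ := pvElim_fold hs0 hm1 c hlen (W + 1 - s) (by omega)
    refine ⟨?_, a1⟩
    rw [show pvElim s W (pvSc mult (min mult ((W / s : Nat) : Int)).toNat) c
          = (List.range' s (W + 1 - s)).foldl
              (pvElimStep s (pvSc mult (min mult ((W / s : Nat) : Int)).toNat)) c from rfl]
    apply List.ext_getElem (by rw [a1, b1])
    intro n hn1 hn2
    have hnW : n < W + 1 := a1 ▸ hn1
    rw [← List.getD_eq_getElem _ 0 hn1, ← List.getD_eq_getElem _ 0 hn2,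
        a2 n (by omega), b2 n (by omega), if_pos (by omega)]

-- both folds over the factor list agree
lemma fold_eq (N : Int) (W : Nat) : ∀ (l : List Nat) (c : List Int),
    (∀ s ∈ l, 2 ≤ s ∧ s ≤ W) → c.length = W + 1 →
    l.foldl (pvStepA N W) c = l.foldl (pvStepB N W) c := by
  intro l
  induction l with
  | nil => intro c _ _; rfl
  | cons s l ih =>
    intro c hmem hlen
    obtain ⟨hA, hL⟩ := step_eq (hmem s (by simp)).1 (hmem s (by simp)).2 N c hlen
    rw [List.foldl_cons, List.foldl_cons, ← hA,
        ih _ (fun x hx => hmem x (by simp [hx])) (hA ▸ hL)]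

-- ===== VERDICT (by name: the statement is the Claim_ definition above) =====
theorem oper_jet_dim_sln_spec : Claim_equal_oper_jet_dim_sln := by
  intro N weight _
  unfold Spec_oper_jet_dim_sln oper_jet_dim_sln oper_jet_dim_sln_alt
  by_cases hneg : weight < 0
  · rw [if_pos hneg, if_pos hneg]
  · rw [if_neg hneg, if_neg hneg]
    by_cases h0 : weight = 0
    · subst h0
      simp
    · rw [if_neg h0]
      have hW1 : 1 ≤ weight.toNat := by omega
      show ((List.range' 2 (weight.toNat - 1)).foldl (pvStepA N weight.toNat)
              ((List.replicate (weight.toNat + 1) (0 : Int)).set 0 1)).getD weight.toNat 0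
          = ((List.range' 2 (weight.toNat - 1)).foldl (pvStepB N weight.toNat)
              (1 :: List.replicate weight.toNat 0)).getD weight.toNat 0
      set W := weight.toNat with hWdef
      have hc0 : (List.replicate (W + 1) (0 : Int)).set 0 1 = 1 :: List.replicate W 0 := by
        rw [List.replicate_succ]
        rfl
      rw [hc0]
      rw [fold_eq N W (List.range' 2 (W - 1)) (1 :: List.replicate W 0)
        (fun s hs => by
          rw [List.mem_range'_1] at hs
          omega)
        (by simp)]
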